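-- pv_equiv track=rewrite | github.com/Pintass/cryptologie_vel | vernam_cryto_script.py | chiffrer_ascii
-- ===== SOURCE A (Python) =====
-- def chiffrer_ascii(mdp:str, cle_chiffrement:str):
--     mdp_chiffre = []
--     mdp_initial = []
--     for x in mdp:
--         mdp_initial.append(format(ord(x), '08b'))
--     mdp = "".join(v for v in mdp_initial) #on passe le mdp en binaire
--
--     cle = (cle_chiffrement * len(mdp))[:len(mdp)]
--     for mdp_caractere, cle_chiffrement_caractere in zip(mdp, cle):
--         if mdp_caractere == cle_chiffrement_caractere:
--             mdp_chiffre.append("0")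
--         else:
--             mdp_chiffre.append("1")
--
--     mdp_chiffre = "".join(v for v in mdp_chiffre)
--     return ''.join(
--         chr(int(mdp_chiffre[i:i+8], 2))
--         for i in range(0, len(mdp_chiffre), 8)
--     ) # on remet avec le bon format
-- ===== SOURCE B (Python) =====
-- def chiffrer_ascii(mdp: str, cle_chiffrement: str):
--     if not cle_chiffrement:
--         return ""
--     k = len(cle_chiffrement)
--     out = []
--     idx = 0
--     for x in mdp:
--         val = 0
--         for j, b in enumerate(format(ord(x), '08b')):
--             val = 2 * val + (0 if b == cle_chiffrement[(idx + j) % k] else 1)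
--         idx += 8
--         out.append(chr(val))
--     return ''.join(out)
-- ===== Notes on version B (the rewrite author's own statement) =====
-- stated objective: faster
-- what changed: B processes one character at a time in a single pass with a running global bit index into the key ((idx+j) % len(key)), computing each output byte's value arithmetically on the fly, instead of A's pipeline that concatenates a full 8n-bit string, materialises the key repeated 8n times and then sliced (O(n*k) work), zips the two strings, and re-slices the result into 8-bit groups.
import Mathlib
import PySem

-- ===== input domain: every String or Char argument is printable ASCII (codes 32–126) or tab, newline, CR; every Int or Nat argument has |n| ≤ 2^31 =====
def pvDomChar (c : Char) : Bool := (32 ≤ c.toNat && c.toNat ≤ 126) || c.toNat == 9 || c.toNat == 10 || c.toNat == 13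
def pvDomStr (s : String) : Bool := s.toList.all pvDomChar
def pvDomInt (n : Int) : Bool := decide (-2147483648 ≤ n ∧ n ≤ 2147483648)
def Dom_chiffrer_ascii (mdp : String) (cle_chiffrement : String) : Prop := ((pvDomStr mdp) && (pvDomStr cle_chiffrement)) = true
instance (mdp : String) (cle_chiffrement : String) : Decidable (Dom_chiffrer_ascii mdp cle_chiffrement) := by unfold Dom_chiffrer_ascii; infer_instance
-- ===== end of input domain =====

-- B re-decomposes A's four-pass pipeline (full bit-string, repeated-and-sliced key, zip, re-slice
-- into 8-bit groups) into a single pass over the characters with a running global bit index; the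
-- equivalence proved is about the return value for all inputs (neither side mutates anything).

-- ===== PORT A =====
-- format(ord x, '08b') : the 8 binary digit characters of the char's code
def bin8 (c : Char) : List Char :=
  (List.range 8).map (fun i => if (c.toNat / 2 ^ (7 - i)) % 2 == 1 then '1' else '0')

-- int(s, 2) on a string of '0'/'1' characters
def intOfBin (l : List Char) : Nat :=
  l.foldl (fun a c => 2 * a + (if c == '1' then 1 else 0)) 0

-- ''.join(chr(int(s[i:i+8],2)) for i in range(0, len(s), 8))
def groupA (l : List Char) : List Char :=
  if l = [] then []
  else Char.ofNat (intOfBin (l.take 8)) :: groupA (l.drop 8)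
termination_by l.length
decreasing_by
  cases l with
  | nil => simp_all
  | cons a t => simp [List.length_drop]

def chiffrer_ascii (mdp : String) (cle_chiffrement : String) : String :=
  let bits := (mdp.toList.map bin8).flatten
  let n := bits.length
  let cle := (List.flatten (List.replicate n cle_chiffrement.toList)).take n
  let enc := (bits.zip cle).map (fun p => if p.1 == p.2 then '0' else '1')
  String.ofList (groupA enc)

-- ===== PORT B =====
-- inner loop of Source B: the output byte for one input character, key indexed at (idx+j) % k
def encChar (key : List Char) (idx : Nat) (c : Char) : Char :=
  Char.ofNat ((bin8 c).zipIdx.foldl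
    (fun v p => 2 * v + (if p.1 == key.getD ((idx + p.2) % key.length) ' ' then 0 else 1)) 0)

-- outer loop of Source B: one output character per input character, idx advances by 8
def goB (key : List Char) (idx : Nat) : List Char → List Char
  | [] => []
  | c :: cs => encChar key idx c :: goB key (idx + 8) cs

def chiffrer_ascii_alt (mdp : String) (cle_chiffrement : String) : String :=
  if cle_chiffrement = "" then ""
  else String.ofList (goB cle_chiffrement.toList 0 mdp.toList)

-- ===== PRECONDITION & SPEC =====
def Spec_chiffrer_ascii (mdp : String) (cle_chiffrement : String) (out : String) : Prop := out = chiffrer_ascii_alt mdp cle_chiffrement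
instance (mdp : String) (cle_chiffrement : String) (out : String) : Decidable (Spec_chiffrer_ascii mdp cle_chiffrement out) := by unfold Spec_chiffrer_ascii; infer_instance

-- ===== CLAIM (what is proved, stated in full; the proofs are below) =====
def Claim_equal_chiffrer_ascii : Prop := ∀ (mdp : String) (cle_chiffrement : String), Dom_chiffrer_ascii mdp cle_chiffrement → Spec_chiffrer_ascii mdp cle_chiffrement (chiffrer_ascii mdp cle_chiffrement)

-- ===== LEMMAS AND PROOFS =====

-- common reference form: one XOR-bit at global position idx
def xbit (key : List Char) (idx : Nat) (b : Char) : Char :=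
  if b == key.getD (idx % key.length) ' ' then '0' else '1'

def cyc (key : List Char) (idx : Nat) : List Char → List Char
  | [] => []
  | b :: bs => xbit key idx b :: cyc key (idx + 1) bs

theorem length_cyc (key : List Char) (idx : Nat) (l : List Char) :
    (cyc key idx l).length = l.length := by
  induction l generalizing idx with
  | nil => rfl
  | cons b bs ih => simp [cyc, ih]

theorem cyc_append (key : List Char) (idx : Nat) (l1 l2 : List Char) :
    cyc key idx (l1 ++ l2) = cyc key idx l1 ++ cyc key (idx + l1.length) l2 := by
  induction l1 generalizing idx with
  | nil => simp [cyc]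
  | cons b bs ih => simp [cyc, ih]; ring_nf

theorem bin8_length (c : Char) : (bin8 c).length = 8 := by simp [bin8]

theorem encChar_eq (key : List Char) (idx : Nat) (c : Char) :
    encChar key idx c = Char.ofNat (intOfBin (cyc key idx (bin8 c))) := by
  simp [encChar, intOfBin, bin8, cyc, xbit, List.range_succ, List.zipIdx]

theorem groupA_append8 (l1 l2 : List Char) (h : l1.length = 8) :
    groupA (l1 ++ l2) = Char.ofNat (intOfBin l1) :: groupA l2 := by
  rw [groupA]
  have hne : l1 ++ l2 ≠ [] := by
    intro hc; have := congrArg List.length hc; simp [h] at this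
  simp only [hne, if_false]
  rw [List.take_append_of_le_length (by omega), List.drop_append_of_le_length (by omega)]
  rw [List.take_of_length_le (by omega), List.drop_eq_nil_of_le (by omega)]
  simp

theorem goB_eq_groupA_cyc (key : List Char) (cs : List Char) (idx : Nat) :
    goB key idx cs = groupA (cyc key idx ((cs.map bin8).flatten)) := by
  induction cs generalizing idx with
  | nil => simp [goB, cyc, groupA]
  | cons c cs ih =>
      simp only [List.map_cons, List.flatten_cons, cyc_append, bin8_length]
      rw [groupA_append8 _ _ (by rw [length_cyc, bin8_length]), goB, encChar_eq, ih]

theorem flatten_replicate_getD (key : List Char) (m i : Nat) (d : Char)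
    (h : i < m * key.length) :
    (List.flatten (List.replicate m key)).getD i d = key.getD (i % key.length) d := by
  induction m generalizing i with
  | zero => omega
  | succ m ih =>
      rw [List.replicate_succ, List.flatten_cons]
      rw [Nat.succ_mul] at h
      by_cases hi : i < key.length
      · rw [List.getD_append _ _ _ _ hi, Nat.mod_eq_of_lt hi]
      · have hi' : key.length ≤ i := Nat.le_of_not_lt hi
        rw [List.getD_append_right _ _ _ _ hi', ih _ (by omega),
          Nat.mod_eq_sub_mod hi']

theorem zip_eq_cyc (key : List Char) (bits : List Char) :
    ∀ (cle : List Char) (idx : Nat), bits.length ≤ cle.length →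
    (∀ i, i < bits.length → cle.getD i ' ' = key.getD ((idx + i) % key.length) ' ') →
    (bits.zip cle).map (fun p => if p.1 == p.2 then '0' else '1') = cyc key idx bits := by
  induction bits with
  | nil => intro cle idx _ _; simp [cyc]
  | cons b bs ih =>
      intro cle idx hlen hget
      cases cle with
      | nil => simp at hlen
      | cons k0 cle =>
          have h0 := hget 0 (by simp)
          simp only [List.getD_cons_zero, Nat.add_zero] at h0
          simp only [List.zip_cons_cons, List.map_cons, cyc, xbit, h0]
          refine congrArg _ (ih cle (idx + 1) (by simpa using hlen) ?_)
          intro i hi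
          have := hget (i + 1) (by simpa using Nat.succ_lt_succ hi)
          simpa [Nat.add_assoc, Nat.add_comm 1 i] using this

theorem main_eq (mdp cle_chiffrement : String) :
    chiffrer_ascii mdp cle_chiffrement = chiffrer_ascii_alt mdp cle_chiffrement := by
  unfold chiffrer_ascii chiffrer_ascii_alt
  by_cases hk : cle_chiffrement = ""
  · subst hk
    simp [groupA]
  · have hkl : cle_chiffrement.toList ≠ [] := by
      simpa [String.toList_eq_nil_iff] using hk
    have hkpos : 0 < cle_chiffrement.toList.length := List.length_pos_iff.mpr hkl
    simp only [hk, if_false]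
    set key := cle_chiffrement.toList with hkey
    set bits := (mdp.toList.map bin8).flatten with hbits
    set n := bits.length with hn
    have hcle_len : ((List.flatten (List.replicate n key)).take n).length = n := by
      simp [List.length_take, List.length_flatten]
      calc n = n * 1 := (Nat.mul_one n).symm
        _ ≤ n * key.length := Nat.mul_le_mul_left n hkpos
    rw [goB_eq_groupA_cyc, ← hbits]
    refine congrArg (fun l => String.ofList (groupA l)) ?_
    refine zip_eq_cyc key bits _ 0 (by rw [hcle_len]) ?_
    intro i hi
    have hi' : i < n * key.length := by
      calc i < n := hi
        _ = n * 1 := (Nat.mul_one n).symm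
        _ ≤ n * key.length := Nat.mul_le_mul_left n hkpos
    rw [Nat.zero_add]
    have hi2 : i < n := by rw [hn]; exact hi
    rw [show ((List.flatten (List.replicate n key)).take n).getD i ' '
        = (List.flatten (List.replicate n key)).getD i ' ' by
      simp [List.getD, hi2]]
    exact flatten_replicate_getD key n i ' ' hi'

-- ===== VERDICT (by name: the statement is the Claim_ definition above) =====
theorem chiffrer_ascii_spec : Claim_equal_chiffrer_ascii := by
  intro mdp cle _
  unfold Spec_chiffrer_ascii
  exact main_eq mdp cle
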